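-- pv_equiv track=rewrite | github.com/Hong9915/algorithm | Python3/프로그래머스/1/140108. 문자열 나누기/문자열 나누기.py | solution
-- ===== SOURCE A (Python) =====
-- def solution(s):
--     result = 0
--     i = 0
--
--     while i < len(s):
--         x = s[i]
--         x_count = 0
--         other_count = 0
--         start = i
--
--         while i < len(s):
--             if s[i] == x:
--                 x_count += 1
--             else:
--                 other_count += 1
--
--             i += 1
--
--             if x_count == other_count:
--                 break
--
--         result += 1
--
--     return result
-- ===== SOURCE B (Python) =====
-- def solution(s):
--     # Stack-based, like bracket matching: the stack holds unmatched copies of the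
--     # current segment's reference char; a matching char is pushed, a different
--     # char cancels one off the stack; a segment starts whenever the stack is empty.
--     stack = []
--     result = 0
--     for c in s:
--         if not stack:
--             stack.append(c)
--             result += 1
--         elif stack[-1] == c:
--             stack.append(c)
--         else:
--             stack.pop()
--     return result
-- ===== Notes on version B (the rewrite author's own statement) =====
-- stated objective: alternative
-- what changed: Replaced A's nested while loops with two equality-tested counters and an inner break by a bracket-matching style stack: matching chars are pushed, non-matching chars cancel one off the stack, and a segment is counted whenever the stack is empty.
import Mathlib
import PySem

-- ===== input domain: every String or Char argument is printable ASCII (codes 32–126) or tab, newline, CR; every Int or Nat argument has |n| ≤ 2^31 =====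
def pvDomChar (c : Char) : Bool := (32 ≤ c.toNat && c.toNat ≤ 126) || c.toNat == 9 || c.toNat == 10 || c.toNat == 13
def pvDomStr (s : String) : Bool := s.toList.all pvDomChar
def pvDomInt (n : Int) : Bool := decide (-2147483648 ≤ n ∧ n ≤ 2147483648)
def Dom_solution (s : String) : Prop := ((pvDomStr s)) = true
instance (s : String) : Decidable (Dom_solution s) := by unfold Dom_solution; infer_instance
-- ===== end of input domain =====

-- B replaces A's nested counting loops by a bracket-matching stack: matching
-- chars are pushed, non-matching chars cancel one, empty stack starts a segment
-- (objective: alternative).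

-- ===== PORT A =====
-- inner while loop of A: consumes chars, counting x vs others, breaks when equal;
-- returns the remaining (unconsumed) characters
def solAInner (x : Char) (xc oc : Int) : List Char → List Char
  | [] => []
  | c :: rest =>
    let xc' := if c = x then xc + 1 else xc
    let oc' := if c = x then oc else oc + 1
    if xc' = oc' then rest else solAInner x xc' oc' rest

-- termination helper for the outer loop (cited by name in decreasing_by)
theorem solAInner_length (x : Char) : ∀ (l : List Char) (xc oc : Int),
    (solAInner x xc oc l).length ≤ l.length := by
  intro l
  induction l with
  | nil => intro xc oc; simp [solAInner]
  | cons c rest ih =>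
    intro xc oc
    simp only [solAInner]
    split <;> split
    · simp
    · exact le_trans (ih _ _) (Nat.le_succ _)
    · simp
    · exact le_trans (ih _ _) (Nat.le_succ _)

theorem solAInner_lt (c : Char) (rest : List Char) :
    (solAInner c 0 0 (c :: rest)).length < (c :: rest).length := by
  have h : solAInner c 0 0 (c :: rest) = solAInner c 1 0 rest := by
    simp [solAInner]
  rw [h]
  exact Nat.lt_succ_of_le (solAInner_length c rest 1 0)

-- outer while loop of A
def solAOuter : Int → List Char → Int
  | res, [] => res
  | res, c :: rest => solAOuter (res + 1) (solAInner c 0 0 (c :: rest))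
termination_by _ l => l.length
decreasing_by exact solAInner_lt c rest

def solution (s : String) : Int := solAOuter 0 s.toList

-- ===== PORT B =====
-- state: (stack, result); the Lean list head is the Python stack's top (stack[-1])
def stepB (st : List Char × Int) (c : Char) : List Char × Int :=
  match st with
  | ([], res) => ([c], res + 1)
  | (t :: rest, res) => if t = c then (c :: t :: rest, res) else (rest, res)

def solution_alt (s : String) : Int := (s.toList.foldl stepB ([], 0)).2

-- ===== PRECONDITION & SPEC =====
def Spec_solution (s : String) (out : Int) : Prop := out = solution_alt s
instance (s : String) (out : Int) : Decidable (Spec_solution s out) := by unfold Spec_solution; infer_instance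

-- ===== CLAIM (what is proved, stated in full; the proofs are below) =====
def Claim_equal_solution : Prop := ∀ (s : String), Dom_solution s → Spec_solution s (solution s)

-- ===== LEMMAS AND PROOFS =====
-- A's inner loop depends on its counters only through their difference
theorem solAInner_diff (x : Char) : ∀ (l : List Char) (xc oc xc2 oc2 : Int),
    xc - oc = xc2 - oc2 → solAInner x xc oc l = solAInner x xc2 oc2 l := by
  intro l
  induction l with
  | nil => intro _ _ _ _ _; rfl
  | cons c rest ih =>
    intro xc oc xc2 oc2 h
    by_cases hc : c = x
    · simp only [solAInner, if_pos hc]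
      by_cases hb : xc + 1 = oc
      · rw [if_pos hb, if_pos (by omega)]
      · rw [if_neg hb, if_neg (by omega)]
        exact ih _ _ _ _ (by omega)
    · simp only [solAInner, if_neg hc]
      by_cases hb : xc = oc + 1
      · rw [if_pos hb, if_pos (by omega)]
      · rw [if_neg hb, if_neg (by omega)]
        exact ih _ _ _ _ (by omega)

-- B's fold through one A-segment: while the stack holds k+1 copies of x, a
-- matching char pushes one and a different char pops one; the stack empties
-- exactly where A's inner loop breaks.
theorem inner_fold : ∀ (l : List Char) (k : Nat) (x : Char) (res : Int),
    (l.foldl stepB (List.replicate (k + 1) x, res)).2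
      = ((solAInner x ((k : Int) + 1) 0 l).foldl stepB ([], res)).2 := by
  intro l
  induction l with
  | nil => intro k x res; simp [solAInner]
  | cons c rest ih =>
    intro k x res
    by_cases hc : c = x
    · have hstep : stepB (List.replicate (k + 1) x, res) c
          = (List.replicate (k + 2) x, res) := by
        simp [stepB, List.replicate_succ, hc]
      have hinner : solAInner x ((k : Int) + 1) 0 (c :: rest)
          = solAInner x ((k : Int) + 2) 0 rest := by
        simp only [solAInner, if_pos hc]
        rw [if_neg (by omega)]
        exact solAInner_diff x rest _ _ _ _ (by ring)
      rw [List.foldl_cons, hstep, hinner]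
      have := ih (k + 1) x res
      simpa [List.replicate_succ] using this
    · have hstep : stepB (List.replicate (k + 1) x, res) c
          = (List.replicate k x, res) := by
        simp only [List.replicate_succ, stepB]
        rw [if_neg (fun h => hc h.symm)]
      rw [List.foldl_cons, hstep]
      cases k with
      | zero =>
        have hinner : solAInner x ((0 : Nat) + 1 : Int) 0 (c :: rest) = rest := by
          simp [solAInner, hc]
        rw [hinner]
        simp
      | succ k =>
        have hinner : solAInner x ((k : Int) + 1 + 1) 0 (c :: rest)
            = solAInner x ((k : Int) + 1) 0 rest := by
          simp only [solAInner, if_neg hc]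
          rw [if_neg (by omega)]
          exact solAInner_diff x rest _ _ _ _ (by ring)
        have h2 : ((k : Nat) + 1 : Nat) = ((k : Int) + 1 + 1 - 1 + 0) := by omega
        rw [show ((k + 1 : Nat) : Int) + 1 = ((k : Int) + 1 + 1) by push_cast; ring] at *
        rw [hinner]
        exact ih k x res

theorem outer_fold : ∀ (n : Nat) (l : List Char), l.length ≤ n →
    ∀ (res : Int), solAOuter res l = (l.foldl stepB ([], res)).2 := by
  intro n
  induction n with
  | zero =>
    intro l hl res
    have : l = [] := List.eq_nil_of_length_eq_zero (Nat.le_zero.mp hl)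
    subst this; simp [solAOuter]
  | succ n ih =>
    intro l hl res
    cases l with
    | nil => simp [solAOuter]
    | cons c rest =>
      have hA : solAOuter res (c :: rest) = solAOuter (res + 1) (solAInner c 1 0 rest) := by
        have h0 : solAInner c 0 0 (c :: rest) = solAInner c 1 0 rest := by
          simp [solAInner]
        rw [solAOuter, h0]
      have hstep : stepB ([], res) c = ([c], res + 1) := rfl
      have hrep : ([c] : List Char) = List.replicate (0 + 1) c := by simp
      rw [hA, List.foldl_cons, hstep, hrep,
          inner_fold rest 0 c (res + 1)]
      have h1 : solAInner c ((0 : Nat) + 1 : Int) 0 rest = solAInner c 1 0 rest := by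
        norm_num
      rw [h1]
      exact ih (solAInner c 1 0 rest)
        (le_trans (solAInner_length c rest 1 0) (Nat.le_of_succ_le_succ hl))
        (res + 1)

-- ===== VERDICT (by name: the statement is the Claim_ definition above) =====
theorem solution_spec : Claim_equal_solution := by
  intro s _
  unfold Spec_solution solution solution_alt
  exact outer_fold s.toList.length s.toList le_rfl 0
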